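-- pv_equiv track=rewrite | github.com/oguzhanctk/scrawl | Hackerrank/algorithm.py | optimal_absolutePermutation
-- ===== SOURCE A (Python) =====
-- def optimal_absolutePermutation(n, k):
--     res_list = []
--
--     if k == 0:
--         return list(range(1, n + 1))
--
--     if (n % (k * 2)) != 0:
--         return [-1]
--
--     for _i in range(1, n, 2 * k):
--         temp = list(range(_i + k, _i + 2 * k)) + list(range(_i, _i + k))
--         res_list += temp
--
--     return res_list
-- ===== SOURCE B (Python) =====
-- def optimal_absolutePermutation(n, k):
--     if k == 0:
--         return list(range(1, n + 1))
--     if n % (2 * k) != 0: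
--         return [-1]
--     out = []
--     for p in range(1, n + 1):
--         b = (p - 1) // k
--         out.append(p + k if b % 2 == 0 else p - k)
--     return out
-- ===== Notes on version B (the rewrite author's own statement) =====
-- stated objective: simpler
-- what changed: Replaces A's block construction (concatenating two k-length ranges per 2k-block) with a single element-wise pass that decides p+k vs p-k from the parity of the block index (p-1)//k.
-- outside the precondition, e.g. on optimal_absolutePermutation(2, -1): A returns [], B returns [0, 3]
import Mathlib
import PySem

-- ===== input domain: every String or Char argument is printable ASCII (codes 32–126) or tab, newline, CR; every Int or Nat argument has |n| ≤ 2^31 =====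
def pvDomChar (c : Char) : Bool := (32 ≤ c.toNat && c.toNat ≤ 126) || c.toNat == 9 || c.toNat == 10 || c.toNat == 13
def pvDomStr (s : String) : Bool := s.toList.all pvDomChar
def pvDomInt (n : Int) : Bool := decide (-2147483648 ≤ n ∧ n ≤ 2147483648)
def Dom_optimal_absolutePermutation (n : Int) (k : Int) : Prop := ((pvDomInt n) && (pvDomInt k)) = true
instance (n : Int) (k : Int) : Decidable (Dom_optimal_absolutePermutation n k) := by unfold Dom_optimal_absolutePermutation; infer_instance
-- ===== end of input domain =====

-- B replaces A's per-block construction (two k-length ranges per 2k-block) by a single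
-- element-wise pass branching on the parity of the block index (p-1)//k; objective: simpler.

-- ===== PORT A =====
def optimal_absolutePermutation (n : Int) (k : Int) : List Int :=
  if k = 0 then PySem.List.pyRange 1 (n + 1) 1
  else if PySem.Int.mod n (k * 2) ≠ 0 then [-1]
  else
    (PySem.List.pyRange 1 n (2 * k)).foldl
      (fun res_list i =>
        res_list ++ (PySem.List.pyRange (i + k) (i + 2 * k) 1 ++ PySem.List.pyRange i (i + k) 1))
      []

-- ===== PORT B =====
def optimal_absolutePermutation_alt (n : Int) (k : Int) : List Int :=
  if k = 0 then PySem.List.pyRange 1 (n + 1) 1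
  else if PySem.Int.mod n (2 * k) ≠ 0 then [-1]
  else
    (PySem.List.pyRange 1 (n + 1) 1).foldl
      (fun out p =>
        out ++ [if PySem.Int.mod (PySem.Int.floordiv (p - 1) k) 2 = 0 then p + k else p - k])
      []

-- ===== PRECONDITION & SPEC =====
-- Pre_ excludes negative k with 2|k| dividing n and n ≥ 1, outside the problem's natural
-- domain: there A's backwards block range(1,n,2k) yields an accidental empty list while B's
-- natural element-wise pass returns a nonempty one.
def Pre_optimal_absolutePermutation (n : Int) (k : Int) : Prop :=
  0 ≤ k ∨ n < 1 ∨ PySem.Int.mod n (2 * k) ≠ 0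
instance (n : Int) (k : Int) : Decidable (Pre_optimal_absolutePermutation n k) := by
  unfold Pre_optimal_absolutePermutation; infer_instance

def pvWitness_optimal_absolutePermutation : Int × Int := (4, 2)

def Spec_optimal_absolutePermutation (n : Int) (k : Int) (out : List Int) : Prop :=
  out = optimal_absolutePermutation_alt n k
instance (n : Int) (k : Int) (out : List Int) : Decidable (Spec_optimal_absolutePermutation n k out) := by
  unfold Spec_optimal_absolutePermutation; infer_instance

-- ===== CLAIM (what is proved, stated in full; the proofs are below) =====
def Claim_equal_optimal_absolutePermutation : Prop :=
  ∀ (n : Int) (k : Int), Dom_optimal_absolutePermutation n k →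
    Pre_optimal_absolutePermutation n k →
    Spec_optimal_absolutePermutation n k (optimal_absolutePermutation n k)

-- ===== LEMMAS AND PROOFS =====

-- the element-wise map B applies
def pvG (k p : Int) : Int :=
  if PySem.Int.mod (PySem.Int.floordiv (p - 1) k) 2 = 0 then p + k else p - k

-- shifting a step-1 range
theorem pvMapAddRange (a b c : Int) :
    (PySem.List.pyRange a b 1).map (fun p => p + c) = PySem.List.pyRange (a + c) (b + c) 1 := by
  rw [PySem.List.pyRange_one, PySem.List.pyRange_one, List.map_map]
  have h : b + c - (a + c) = b - a := by ring
  rw [h]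
  refine List.map_congr_left fun x _ => ?_
  simp [Function.comp]; ring

-- A's stepped range as a mapped List.range
theorem pvRangeA (k : Int) (hk : 0 < k) (j : Nat) :
    PySem.List.pyRange 1 (2 * k * (j : Int)) (2 * k) =
      (List.range j).map (fun t : Nat => 1 + 2 * k * (t : Int)) := by
  have h2k : (0:Int) < 2 * k := by omega
  rw [PySem.List.pyRange_of_pos _ _ h2k]
  rcases Nat.eq_zero_or_pos j with hj | hj
  · subst hj; simp
  · have hlt : (1:Int) < 2 * k * (j : Int) := by
      have hj1 : (1:Int) ≤ (j : Int) := by exact_mod_cast hj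
      nlinarith
    rw [if_pos hlt]
    have hnum : 2 * k * (j : Int) - 1 + 2 * k - 1 = (2 * k - 2) + 2 * k * (j : Int) := by ring
    have hdiv : (2 * k * (j : Int) - 1 + 2 * k - 1) / (2 * k) = (j : Int) := by
      rw [hnum, Int.add_mul_ediv_left _ _ (by omega : (2:Int) * k ≠ 0),
        Int.ediv_eq_zero_of_lt (by omega) (by omega)]
      simp
    rw [hdiv, Int.toNat_natCast]

-- one 2k-block: B's element-wise pass over [s, s+2k) equals A's two half-ranges
theorem pvBlock (k : Int) (hk : 0 < k) (m : Int) :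
    (PySem.List.pyRange (2 * k * m + 1) (2 * k * m + 1 + 2 * k) 1).map (pvG k) =
      PySem.List.pyRange (2 * k * m + 1 + k) (2 * k * m + 1 + 2 * k) 1 ++
        PySem.List.pyRange (2 * k * m + 1) (2 * k * m + 1 + k) 1 := by
  have hcomm : 2 * m * k = 2 * k * m := by ring
  rw [PySem.List.pyRange_one_append (2 * k * m + 1) (2 * k * m + 1 + k)
    (2 * k * m + 1 + 2 * k) (by omega) (by omega), List.map_append]
  have hfst : (PySem.List.pyRange (2 * k * m + 1) (2 * k * m + 1 + k) 1).map (pvG k) =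
      PySem.List.pyRange (2 * k * m + 1 + k) (2 * k * m + 1 + 2 * k) 1 := by
    have : (PySem.List.pyRange (2 * k * m + 1) (2 * k * m + 1 + k) 1).map (pvG k) =
        (PySem.List.pyRange (2 * k * m + 1) (2 * k * m + 1 + k) 1).map (fun p => p + k) := by
      refine List.map_congr_left fun p hp => ?_
      rw [PySem.List.mem_pyRange_one] at hp
      have hfd : PySem.Int.floordiv (p - 1) k = 2 * m := by
        rw [PySem.Int.floordiv_eq_iff_of_pos hk]
        constructor <;> linarith [hcomm, hp.1, hp.2]
      unfold pvG
      rw [hfd, if_pos ((PySem.Int.mod_eq_zero_iff_dvd _ _).mpr ⟨m, by ring⟩)]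
    rw [this, pvMapAddRange]
    congr 1 <;> ring
  have hsnd : (PySem.List.pyRange (2 * k * m + 1 + k) (2 * k * m + 1 + 2 * k) 1).map (pvG k) =
      PySem.List.pyRange (2 * k * m + 1) (2 * k * m + 1 + k) 1 := by
    have : (PySem.List.pyRange (2 * k * m + 1 + k) (2 * k * m + 1 + 2 * k) 1).map (pvG k) =
        (PySem.List.pyRange (2 * k * m + 1 + k) (2 * k * m + 1 + 2 * k) 1).map
          (fun p => p + (-k)) := by
      refine List.map_congr_left fun p hp => ?_
      rw [PySem.List.mem_pyRange_one] at hp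
      have hfd : PySem.Int.floordiv (p - 1) k = 2 * m + 1 := by
        rw [PySem.Int.floordiv_eq_iff_of_pos hk]
        constructor <;> linarith [hcomm, hp.1, hp.2]
      have hmod : PySem.Int.mod (2 * m + 1) 2 ≠ 0 := by
        intro h
        obtain ⟨c, hc⟩ := (PySem.Int.mod_eq_zero_iff_dvd _ _).mp h
        omega
      unfold pvG
      rw [hfd, if_neg hmod]; ring
    rw [this, pvMapAddRange]
    congr 1 <;> ring
  rw [hfst, hsnd]

-- the main loop equivalence on n = 2k·j
theorem pvMain (k : Int) (hk : 0 < k) (j : Nat) :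
    ((List.range j).map (fun t : Nat => 1 + 2 * k * (t : Int))).flatMap
        (fun i => PySem.List.pyRange (i + k) (i + 2 * k) 1 ++ PySem.List.pyRange i (i + k) 1) =
      (PySem.List.pyRange 1 (2 * k * (j : Int) + 1) 1).map (pvG k) := by
  induction j with
  | zero => simp [PySem.List.pyRange_one_eq_nil]
  | succ j ih =>
    have hj0 : (0:Int) ≤ 2 * k * (j : Int) := by positivity
    rw [List.range_succ, List.map_append, List.flatMap_append, ih]
    have hsplit : PySem.List.pyRange 1 (2 * k * ((j : Int) + 1) + 1) 1 =
        PySem.List.pyRange 1 (2 * k * (j : Int) + 1) 1 ++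
          PySem.List.pyRange (2 * k * (j : Int) + 1) (2 * k * ((j : Int) + 1) + 1) 1 := by
      exact PySem.List.pyRange_one_append 1 (2 * k * (j : Int) + 1)
        (2 * k * ((j : Int) + 1) + 1) (by omega) (by nlinarith)
    push_cast
    rw [hsplit, List.map_append]
    congr 1
    have hend : 2 * k * ((j : Int) + 1) + 1 = 2 * k * (j : Int) + 1 + 2 * k := by ring
    rw [hend, pvBlock k hk (j : Int)]
    simp [List.flatMap]
    congr 1
    · congr 1 <;> ring
    · congr 1 <;> ring

-- ===== VERDICT (by name: the statement is the Claim_ definition above) =====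
theorem optimal_absolutePermutation_spec : Claim_equal_optimal_absolutePermutation := by
  intro n k _ hpre
  unfold Spec_optimal_absolutePermutation optimal_absolutePermutation optimal_absolutePermutation_alt
  by_cases hk0 : k = 0
  · simp [hk0]
  · rw [if_neg hk0, if_neg hk0, mul_comm k 2]
    by_cases hmod : PySem.Int.mod n (2 * k) ≠ 0
    · rw [if_pos hmod, if_pos hmod]
    · rw [if_neg hmod, if_neg hmod]
      obtain ⟨m, hm⟩ := (PySem.Int.mod_eq_zero_iff_dvd _ _).mp (not_not.mp hmod)
      rw [PySem.List.foldl_append_eq_flatMap, PySem.List.foldl_append_singleton_eq_map,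
        List.nil_append, List.nil_append]
      by_cases hk : 0 < k
      case neg =>
        -- k < 0: Pre_ forces n < 1 and both sides are empty
        have hkneg : k < 0 := by omega
        have hn1 : n < 1 := by
          rcases hpre with h | h | h
          · omega
          · exact h
          · exact absurd (not_not.mp hmod) h
        have hB : PySem.List.pyRange 1 (n + 1) 1 = [] :=
          PySem.List.pyRange_one_eq_nil (by omega)
        have hA : (PySem.List.pyRange 1 n (2 * k)).flatMap
            (fun i => PySem.List.pyRange (i + k) (i + 2 * k) 1 ++
              PySem.List.pyRange i (i + k) 1) = [] := by
          rw [List.flatMap_eq_nil_iff]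
          intro i _
          rw [PySem.List.pyRange_one_eq_nil (by omega : i + 2 * k ≤ i + k),
            PySem.List.pyRange_one_eq_nil (by omega : i + k ≤ i)]
          rfl
        rw [hA, hB]
        rfl
      case pos =>
      by_cases hmle : m ≤ 0
      · have hn : n ≤ 0 := by nlinarith
        have h1 : PySem.List.pyRange 1 n (2 * k) = [] := by
          rw [PySem.List.pyRange_of_pos _ _ (by omega : (0:Int) < 2 * k),
            if_neg (by omega : ¬ (1:Int) < n)]
          simp
        have h2 : PySem.List.pyRange 1 (n + 1) 1 = [] :=
          PySem.List.pyRange_one_eq_nil (by omega)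
        rw [h1, h2]; rfl
      · have hmpos : 0 < m := by omega
        set j : Nat := m.toNat with hj
        have hjm : (j : Int) = m := Int.toNat_of_nonneg (by omega)
        have hn : n = 2 * k * (j : Int) := by rw [hjm, hm]
        rw [hn, pvRangeA k hk j]
        exact pvMain k hk j
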